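-- pv_equiv track=rewrite | github.com/ishmam-hossain/problem-solving | codeforces/131A_caps_lock.py | old_cAPS_Lock
-- ===== SOURCE A (Python) =====
-- def old_cAPS_Lock(s):
--     res = ['']
--     for i in range(len(s)):
--         if i == 0:
--             res.append(s[0])
--             continue
--         elif not s[i].isupper():
--             return s
--         res.append(s[i].lower())
--     else:
--         return "".join(res)
-- ===== SOURCE B (Python) =====
-- def old_cAPS_Lock(s):
--     # decide first, transform once: lowercase the tail iff every tail char is uppercase
--     if all(c.isupper() for c in s[1:]):
--         return s[:1] + s[1:].lower()
--     return s
-- ===== Notes on version B (the rewrite author's own statement) =====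
-- stated objective: idiomatic
-- what changed: B separates validation from transformation: it first checks the predicate all(c.isupper() for c in s[1:]) and then applies one slice-lower-concat s[:1] + s[1:].lower(), instead of A's single loop that interleaves the check with building a list of characters and joining it.
import Mathlib
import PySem

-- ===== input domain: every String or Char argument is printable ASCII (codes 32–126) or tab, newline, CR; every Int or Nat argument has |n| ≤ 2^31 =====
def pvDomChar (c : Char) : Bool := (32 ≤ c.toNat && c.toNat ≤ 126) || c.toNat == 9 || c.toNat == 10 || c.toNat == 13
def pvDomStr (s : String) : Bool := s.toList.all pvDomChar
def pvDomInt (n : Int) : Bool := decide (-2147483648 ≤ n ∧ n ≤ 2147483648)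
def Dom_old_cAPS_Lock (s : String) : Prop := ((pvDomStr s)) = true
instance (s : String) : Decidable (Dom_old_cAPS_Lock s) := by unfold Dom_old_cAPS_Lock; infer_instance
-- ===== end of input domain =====

-- B decides with a separate all-uppercase check on the tail, then transforms with one slice+lower+concat (idiomatic decomposition; same O(n) cost; return-value equivalence).


-- ===== PORT A =====
-- the for-loop over range(len(s)) with the growing list `res` and the early `return s`;
-- res is a list of (single-character or empty) strings, modelled as List (List Char)
def old_cAPS_Lock_loop (cs : List Char) (i : Nat) (res : List (List Char)) : List Char :=
  if h : i < cs.length then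
    if i = 0 then
      -- res.append(s[0]); continue   (here i = 0, so s[0] = cs[i])
      old_cAPS_Lock_loop cs (i + 1) (res ++ [[cs[i]]])
    else if ¬ PySem.Chars.isupper cs[i] then
      -- return s
      cs
    else
      -- res.append(s[i].lower())
      old_cAPS_Lock_loop cs (i + 1) (res ++ [[PySem.Chars.lowerChar cs[i]]])
  else
    -- for-else: return "".join(res)
    PySem.Chars.join [] res
termination_by cs.length - i

def old_cAPS_Lock (s : String) : String :=
  String.mk (old_cAPS_Lock_loop s.toList 0 [[]])  -- res = ['']

-- ===== PORT B =====
def old_cAPS_Lock_alt (s : String) : String :=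
  let cs := s.toList
  if (cs.drop 1).all PySem.Chars.isupper then  -- all(c.isupper() for c in s[1:])
    String.mk (cs.take 1 ++ PySem.Chars.lower (cs.drop 1))  -- s[:1] + s[1:].lower()
  else
    s

-- ===== PRECONDITION & SPEC =====
def Spec_old_cAPS_Lock (s : String) (out : String) : Prop := out = old_cAPS_Lock_alt s
instance (s : String) (out : String) : Decidable (Spec_old_cAPS_Lock s out) := by unfold Spec_old_cAPS_Lock; infer_instance

-- ===== CLAIM (what is proved, stated in full; the proofs are below) =====
def Claim_equal_old_cAPS_Lock : Prop := ∀ (s : String), Dom_old_cAPS_Lock s → Spec_old_cAPS_Lock s (old_cAPS_Lock s)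

-- ===== LEMMAS AND PROOFS =====

theorem pv_join_nil_eq_flatten (xs : List (List Char)) :
    PySem.Chars.join [] xs = xs.flatten := by
  simp [PySem.Chars.join, List.intercalate]
  induction xs with
  | nil => simp
  | cons h t ih => cases t <;> simp_all [List.intersperse]

theorem pv_flatten_singletons (l : List Char) (f : Char → Char) :
    (l.map (fun c => [f c])).flatten = l.map f := by
  induction l <;> simp_all

theorem pv_lower_eq_map (cs : List Char) :
    PySem.Chars.lower cs = cs.map PySem.Chars.lowerChar := by
  simp [PySem.Chars.lower]

theorem old_cAPS_Lock_loop_spec (cs : List Char) :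
    ∀ (n i : Nat) (res : List (List Char)), 1 ≤ i → cs.length - i = n →
    old_cAPS_Lock_loop cs i res =
      if (cs.drop i).all PySem.Chars.isupper then
        PySem.Chars.join [] (res ++ (cs.drop i).map (fun c => [PySem.Chars.lowerChar c]))
      else cs := by
  intro n
  induction n with
  | zero =>
    intro i res hi hn
    have hle : cs.length ≤ i := by omega
    rw [old_cAPS_Lock_loop]
    simp [Nat.not_lt.mpr hle, List.drop_eq_nil_of_le hle]
  | succ n ih =>
    intro i res hi hn
    have hlt : i < cs.length := by omega
    have hdrop : cs.drop i = cs[i] :: cs.drop (i + 1) := List.drop_eq_getElem_cons hlt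
    rw [old_cAPS_Lock_loop]
    rw [dif_pos hlt, if_neg (by omega : ¬ i = 0)]
    by_cases hu : PySem.Chars.isupper cs[i]
    · rw [if_neg (by simp [hu])]
      rw [ih (i + 1) (res ++ [[PySem.Chars.lowerChar cs[i]]]) (by omega) (by omega)]
      rw [hdrop]
      simp only [List.all_cons, hu, Bool.true_and, List.map_cons, List.append_assoc,
        List.cons_append, List.nil_append]
    · rw [if_pos (by simp [hu])]
      rw [hdrop]
      simp only [List.all_cons, hu, Bool.false_and, Bool.false_eq_true, if_false]

-- ===== VERDICT (by name: the statement is the Claim_ definition above) =====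
theorem old_cAPS_Lock_spec : Claim_equal_old_cAPS_Lock := by
  intro s _
  unfold Spec_old_cAPS_Lock old_cAPS_Lock old_cAPS_Lock_alt
  cases hcs : s.toList with
  | nil =>
    have hs : s = "" := by
      have := congrArg String.ofList hcs
      simpa using this
    subst hs
    rw [old_cAPS_Lock_loop]
    simp [PySem.Chars.lower]
  | cons c rest =>
    rw [old_cAPS_Lock_loop]
    rw [dif_pos (by simp : 0 < (c :: rest).length), if_pos rfl]
    rw [old_cAPS_Lock_loop_spec (c :: rest) ((c :: rest).length - 1) 1 _ (le_refl 1) rfl]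
    by_cases hall : rest.all PySem.Chars.isupper
    · simp [hall, pv_join_nil_eq_flatten, pv_lower_eq_map, pv_flatten_singletons]
    · simp only [List.drop_succ_cons, List.drop_zero] at *
      rw [if_neg hall, if_neg hall, ← hcs]
      simp [String.mk]
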